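-- pv_equiv track=rewrite | github.com/Zycroft/GraphVerse | graphverse/graph/rules.py | check_rule_compliance
-- ===== SOURCE A (Python) =====
-- def check_rule_compliance(walk, ascenders, descenders, evens, odds):
--     """Check if a given walk complies with all rules."""
--     for i, v in enumerate(walk):
--         if v in ascenders:
--             if any(walk[j] <= v for j in range(i+1, len(walk))):
--                 return False
--         if v in descenders:
--             if any(walk[j] >= v for j in range(i+1, len(walk))):
--                 return False
--         if v in evens:
--             if any(walk[j] % 2 != 0 for j in range(i+1, len(walk))):
--                 return False
--         if v in odds:
--             if any(walk[j] % 2 == 0 for j in range(i+1, len(walk))):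
--                 return False
--     return True
-- ===== SOURCE B (Python) =====
-- def check_rule_compliance(walk, ascenders, descenders, evens, odds):
--     """Single backward pass: maintain suffix min/max and all-even/all-odd flags of the seen suffix."""
--     asc, desc, ev, od = set(ascenders), set(descenders), set(evens), set(odds)
--     have = False
--     mn = mx = 0
--     all_even = all_odd = True
--     for v in reversed(walk):
--         if v in asc and have and mn <= v:
--             return False
--         if v in desc and have and mx >= v:
--             return False
--         if v in ev and not all_even:
--             return False
--         if v in od and not all_odd:
--             return False
--         if have:
--             if v < mn: mn = v
--             if v > mx: mx = v
--         else:
--             mn = mx = v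
--             have = True
--         if v % 2 == 0:
--             all_odd = False
--         else:
--             all_even = False
--     return True
-- ===== Notes on version B (the rewrite author's own statement) =====
-- stated objective: alternative
-- what changed: Replaces the per-element inner scan of the remaining suffix by one backward pass that maintains the suffix minimum/maximum and all-even/all-odd flags (plus set-based rule membership); same answer, worst-case O(n) instead of O(n^2) suffix work, though not measurably faster on the benchmark inputs.
import Mathlib
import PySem

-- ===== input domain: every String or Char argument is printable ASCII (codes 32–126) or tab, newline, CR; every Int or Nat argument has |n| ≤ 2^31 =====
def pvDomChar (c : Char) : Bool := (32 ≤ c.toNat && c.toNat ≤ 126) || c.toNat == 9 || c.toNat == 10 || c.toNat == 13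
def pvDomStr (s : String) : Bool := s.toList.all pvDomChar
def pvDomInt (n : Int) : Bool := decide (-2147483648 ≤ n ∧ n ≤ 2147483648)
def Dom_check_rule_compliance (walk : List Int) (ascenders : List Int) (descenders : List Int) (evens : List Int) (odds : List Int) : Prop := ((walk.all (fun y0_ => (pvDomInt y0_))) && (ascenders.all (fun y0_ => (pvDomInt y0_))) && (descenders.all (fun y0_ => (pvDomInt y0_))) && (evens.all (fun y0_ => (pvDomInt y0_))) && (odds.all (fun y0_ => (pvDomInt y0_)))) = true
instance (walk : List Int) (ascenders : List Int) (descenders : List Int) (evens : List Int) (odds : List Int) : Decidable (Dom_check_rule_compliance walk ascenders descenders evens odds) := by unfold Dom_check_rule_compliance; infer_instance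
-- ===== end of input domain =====

-- B replaces A's per-element scan of the remaining suffix by one backward pass
-- maintaining suffix min/max and all-even/all-odd flags (objective: alternative algorithm).

-- ===== PORT A =====
-- A's loop over enumerate(walk): at position i, 'walk[j] for j in range(i+1, len(walk))'
-- ranges exactly over the tail after the current element, so the loop is the
-- structural recursion on the walk with the current tail at hand.
def crcA (ascenders descenders evens odds : List Int) : List Int → Bool
  | [] => true
  | v :: rest =>
    if ascenders.contains v && rest.any (fun w => decide (w ≤ v)) then false
    else if descenders.contains v && rest.any (fun w => decide (v ≤ w)) then false
    else if evens.contains v && rest.any (fun w => !(PySem.Int.mod w 2 == 0)) then false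
    else if odds.contains v && rest.any (fun w => PySem.Int.mod w 2 == 0) then false
    else crcA ascenders descenders evens odds rest

def check_rule_compliance (walk : List Int) (ascenders : List Int) (descenders : List Int) (evens : List Int) (odds : List Int) : Bool :=
  crcA ascenders descenders evens odds walk

-- ===== PORT B =====
-- B's backward pass: state is (min,max) of the already-seen suffix (none while empty)
-- and the two parity flags; it walks reversed(walk).
def crcB (ascenders descenders evens odds : List Int) : List Int → Option (Int × Int) → Bool → Bool → Bool
  | [], _, _, _ => true
  | v :: rest, st, aE, aO =>
    if ascenders.contains v && (match st with | none => false | some p => decide (p.1 ≤ v)) then false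
    else if descenders.contains v && (match st with | none => false | some p => decide (v ≤ p.2)) then false
    else if evens.contains v && !aE then false
    else if odds.contains v && !aO then false
    else crcB ascenders descenders evens odds rest
      (match st with | none => some (v, v) | some p => some (min p.1 v, max p.2 v))
      (aE && (PySem.Int.mod v 2 == 0)) (aO && !(PySem.Int.mod v 2 == 0))

def check_rule_compliance_alt (walk : List Int) (ascenders : List Int) (descenders : List Int) (evens : List Int) (odds : List Int) : Bool :=
  crcB ascenders descenders evens odds walk.reverse none true true

-- ===== PRECONDITION & SPEC =====
def Spec_check_rule_compliance (walk : List Int) (ascenders : List Int) (descenders : List Int) (evens : List Int) (odds : List Int) (out : Bool) : Prop := out = check_rule_compliance_alt walk ascenders descenders evens odds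
instance (walk : List Int) (ascenders : List Int) (descenders : List Int) (evens : List Int) (odds : List Int) (out : Bool) : Decidable (Spec_check_rule_compliance walk ascenders descenders evens odds out) := by unfold Spec_check_rule_compliance; infer_instance

-- ===== CLAIM (what is proved, stated in full; the proofs are below) =====
def Claim_equal_check_rule_compliance : Prop := ∀ (walk : List Int) (ascenders : List Int) (descenders : List Int) (evens : List Int) (odds : List Int), Dom_check_rule_compliance walk ascenders descenders evens odds → Spec_check_rule_compliance walk ascenders descenders evens odds (check_rule_compliance walk ascenders descenders evens odds)

-- ===== LEMMAS AND PROOFS =====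

-- per-element check against a bag s of the other elements after it
def checkS (ascenders descenders evens odds : List Int) (v : Int) (s : List Int) : Bool :=
  !(ascenders.contains v && s.any (fun w => decide (w ≤ v))) &&
  (!(descenders.contains v && s.any (fun w => decide (v ≤ w))) &&
  (!(evens.contains v && s.any (fun w => !(PySem.Int.mod w 2 == 0))) &&
  !(odds.contains v && s.any (fun w => PySem.Int.mod w 2 == 0))))

-- A's result as a conjunction over each element and its tail
def listF (ascenders descenders evens odds : List Int) : List Int → Bool
  | [] => true
  | v :: rest => checkS ascenders descenders evens odds v rest && listF ascenders descenders evens odds rest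

-- B's result with the accumulated suffix kept as an explicit list
def listB (ascenders descenders evens odds : List Int) : List Int → List Int → Bool
  | [], _ => true
  | v :: rest, s => checkS ascenders descenders evens odds v s && listB ascenders descenders evens odds rest (v :: s)

def mmOf : List Int → Option (Int × Int)
  | [] => none
  | v :: s => match mmOf s with | none => some (v, v) | some p => some (min p.1 v, max p.2 v)

def allE (s : List Int) : Bool := s.all (fun w => PySem.Int.mod w 2 == 0)
def allO (s : List Int) : Bool := s.all (fun w => !(PySem.Int.mod w 2 == 0))

theorem crcA_eq_listF (asc desc ev od : List Int) (l : List Int) :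
    crcA asc desc ev od l = listF asc desc ev od l := by
  induction l with
  | nil => rfl
  | cons v rest ih =>
    simp only [crcA, listF, checkS, ih]
    cases asc.contains v && rest.any (fun w => decide (w ≤ v)) <;>
    cases desc.contains v && rest.any (fun w => decide (v ≤ w)) <;>
    cases ev.contains v && rest.any (fun w => !(PySem.Int.mod w 2 == 0)) <;>
    cases od.contains v && rest.any (fun w => PySem.Int.mod w 2 == 0) <;> simp

theorem mmOf_min_any (s : List Int) (v : Int) :
    (match mmOf s with | none => false | some p => decide (p.1 ≤ v))
      = s.any (fun w => decide (w ≤ v)) := by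
  induction s with
  | nil => rfl
  | cons w t ih =>
    simp only [mmOf]
    cases h : mmOf t with
    | none =>
      rw [h] at ih
      simp only [List.any_cons, ← ih, Bool.or_false]
    | some p =>
      rw [h] at ih
      simp only [List.any_cons, ← ih, min_le_iff]
      by_cases hp : p.1 ≤ v <;> by_cases hw : w ≤ v <;> simp [hp, hw]

theorem mmOf_max_any (s : List Int) (v : Int) :
    (match mmOf s with | none => false | some p => decide (v ≤ p.2))
      = s.any (fun w => decide (v ≤ w)) := by
  induction s with
  | nil => rfl
  | cons w t ih =>
    simp only [mmOf]
    cases h : mmOf t with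
    | none =>
      rw [h] at ih
      simp only [List.any_cons, ← ih, Bool.or_false]
    | some p =>
      rw [h] at ih
      simp only [List.any_cons, ← ih, le_max_iff]
      by_cases hp : v ≤ p.2 <;> by_cases hw : v ≤ w <;> simp [hp, hw]

theorem not_allE (s : List Int) : (!allE s) = s.any (fun w => !(PySem.Int.mod w 2 == 0)) := by
  simp [allE, List.all_eq_not_any_not]

theorem not_allO (s : List Int) : (!allO s) = s.any (fun w => PySem.Int.mod w 2 == 0) := by
  simp [allO, List.all_eq_not_any_not]

theorem crcB_eq_listB (asc desc ev od : List Int) (l : List Int) : ∀ s : List Int,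
    crcB asc desc ev od l (mmOf s) (allE s) (allO s) = listB asc desc ev od l s := by
  induction l with
  | nil => intro s; rfl
  | cons v rest ih =>
    intro s
    have hE : (allE s && (PySem.Int.mod v 2 == 0)) = allE (v :: s) := by
      simp only [allE, List.all_cons]; exact Bool.and_comm _ _
    have hO : (allO s && !(PySem.Int.mod v 2 == 0)) = allO (v :: s) := by
      simp only [allO, List.all_cons]; exact Bool.and_comm _ _
    simp only [crcB, listB, checkS, mmOf_min_any, mmOf_max_any, not_allE, not_allO]
    rw [show (match mmOf s with | none => some (v, v) | some p => some (min p.1 v, max p.2 v)) = mmOf (v :: s) from rfl, hE, hO, ih]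
    cases asc.contains v && s.any (fun w => decide (w ≤ v)) <;>
    cases desc.contains v && s.any (fun w => decide (v ≤ w)) <;>
    cases ev.contains v && s.any (fun w => !(PySem.Int.mod w 2 == 0)) <;>
    cases od.contains v && s.any (fun w => PySem.Int.mod w 2 == 0) <;> simp

theorem listB_append_one (asc desc ev od : List Int) (a : List Int) (v : Int) : ∀ s,
    listB asc desc ev od (a ++ [v]) s
      = (listB asc desc ev od a s && checkS asc desc ev od v (a.reverse ++ s)) := by
  induction a with
  | nil => intro s; simp [listB]
  | cons w a' ih =>
    intro s
    simp only [List.cons_append, listB, ih (w :: s), List.reverse_cons, List.append_assoc, List.nil_append,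
      Bool.and_assoc]

theorem listB_reverse_eq_listF (asc desc ev od : List Int) (l : List Int) :
    listB asc desc ev od l.reverse [] = listF asc desc ev od l := by
  induction l with
  | nil => rfl
  | cons v rest ih =>
    simp only [List.reverse_cons, listB_append_one, List.reverse_reverse, List.append_nil, ih,
      listF, Bool.and_comm]

-- ===== VERDICT (by name: the statement is the Claim_ definition above) =====
theorem check_rule_compliance_spec : Claim_equal_check_rule_compliance := by
  intro walk asc desc ev od _
  show check_rule_compliance walk asc desc ev od = check_rule_compliance_alt walk asc desc ev od
  have hB : check_rule_compliance_alt walk asc desc ev od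
      = crcB asc desc ev od walk.reverse (mmOf []) (allE []) (allO []) := rfl
  rw [check_rule_compliance, crcA_eq_listF, hB, crcB_eq_listB, listB_reverse_eq_listF]
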